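-- pv_equiv track=rewrite | github.com/MACRODAT/kickstart | public/python/finals/2021/roundA/sweetness.py | computeSweetness
-- ===== SOURCE A (Python) =====
-- def computeSweetness(s):
--     i = 0 # index
--     sw = 0 # sweetness
--     N = len(s)
--     while i < N // 2:
--         if s[i] != s[N - i - 1]:
--             sw += 1
--         i += 1
--     return sw
-- ===== SOURCE B (Python) =====
-- def computeSweetness(s):
--     n = len(s)
--
--     def go(lo, hi):
--         # mismatch count among symmetric pairs (i, n-1-i) for lo <= i < hi,
--         # by divide and conquer on the index range
--         if hi - lo == 0:
--             return 0
--         if hi - lo == 1: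
--             return 1 if s[lo] != s[n - 1 - lo] else 0
--         mid = (lo + hi) // 2
--         return go(lo, mid) + go(mid, hi)
--
--     return go(0, n // 2)
-- ===== Notes on version B (the rewrite author's own statement) =====
-- stated objective: alternative
-- what changed: B replaces A's single linear index loop with a divide-and-conquer recursion: a helper go(lo, hi) splits the pair-index range [0, n//2) at its midpoint and sums the mismatch counts of the two halves, with one symmetric-pair comparison only at singleton ranges.
import Mathlib
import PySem

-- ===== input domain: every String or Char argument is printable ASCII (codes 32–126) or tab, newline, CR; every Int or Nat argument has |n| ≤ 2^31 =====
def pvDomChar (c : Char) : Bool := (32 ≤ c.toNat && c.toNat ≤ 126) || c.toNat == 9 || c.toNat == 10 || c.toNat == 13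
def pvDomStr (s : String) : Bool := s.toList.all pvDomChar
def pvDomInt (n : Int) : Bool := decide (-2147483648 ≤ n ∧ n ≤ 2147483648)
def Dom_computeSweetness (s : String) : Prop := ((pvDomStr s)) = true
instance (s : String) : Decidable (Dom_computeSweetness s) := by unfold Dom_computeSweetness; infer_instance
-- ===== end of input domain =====

-- B replaces A's linear index loop with a divide-and-conquer recursion that splits the
-- pair-index range [0, n//2) in half and sums the two mismatch counts; same cost, different decomposition.

-- ===== PORT A =====
def computeSweetness (s : String) : Int :=
  let N : Int := PySem.Str.len s
  (PySem.List.pyRange 0 (PySem.Int.floordiv N 2) 1).foldl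
    (fun sw i => if PySem.Str.pyGet? s i ≠ PySem.Str.pyGet? s (N - i - 1) then sw + 1 else sw) 0

-- ===== PORT B =====
-- inner helper go(lo, hi) of Source B; fuel = hi - lo bounds the recursion depth (each half of a
-- range of size m >= 2 has size <= m - 1), making the recursion structural; unreachable fuel-0 returns 0
def pvGoB (s : String) (n : Int) : Nat → Int → Int → Int
  | 0, _, _ => 0
  | fuel + 1, lo, hi =>
    if hi - lo ≤ 0 then 0
    else if hi - lo = 1 then
      if PySem.Str.pyGet? s lo ≠ PySem.Str.pyGet? s (n - 1 - lo) then 1 else 0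
    else
      pvGoB s n fuel lo (PySem.Int.floordiv (lo + hi) 2) +
      pvGoB s n fuel (PySem.Int.floordiv (lo + hi) 2) hi

def computeSweetness_alt (s : String) : Int :=
  let n : Int := PySem.Str.len s
  pvGoB s n (PySem.Int.floordiv n 2).toNat 0 (PySem.Int.floordiv n 2)

-- ===== PRECONDITION & SPEC =====
def Spec_computeSweetness (s : String) (out : Int) : Prop := out = computeSweetness_alt s
instance (s : String) (out : Int) : Decidable (Spec_computeSweetness s out) := by unfold Spec_computeSweetness; infer_instance

-- ===== CLAIM (what is proved, stated in full; the proofs are below) =====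
def Claim_equal_computeSweetness : Prop := ∀ (s : String), Dom_computeSweetness s → Spec_computeSweetness s (computeSweetness s)

-- ===== LEMMAS AND PROOFS =====

-- the mismatch test at position k of the list l (against its mirror position)
def pvQ (l : List Char) (k : Nat) : Bool := decide (l.getD k 'a' ≠ l.getD (l.length - 1 - k) 'a')

-- A's loop is the mismatch count over the first half
theorem pvA_eq_countP (s : String) :
    computeSweetness s = ((List.range (s.toList.length / 2)).countP (pvQ s.toList) : Int) := by
  unfold computeSweetness
  set l := s.toList with hl
  set n := l.length with hn
  simp only [PySem.Str.len_eq, ← hl, ← hn]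
  rw [show PySem.Int.floordiv (n : Int) 2 = ((n / 2 : Nat) : Int) from
        (by exact_mod_cast PySem.Int.floordiv_natCast n 2),
      PySem.List.pyRange_zero_natCast, List.foldl_map]
  have hcong : ∀ (acc : Int) (k : Nat), k ∈ List.range (n/2) →
      (if PySem.Str.pyGet? s (k : Int) ≠ PySem.Str.pyGet? s ((n : Int) - (k : Int) - 1) then acc + 1 else acc)
      = (if pvQ l k then acc + 1 else acc) := by
    intro acc k hk
    have hk2 : k < n / 2 := by simpa using hk
    have hkn : k < n := by omega
    have hj : (n : Int) - (k : Int) - 1 = ((n - 1 - k : Nat) : Int) := by omega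
    have hjn : n - 1 - k < n := by omega
    simp only [PySem.Str.pyGet?_natCast, hj, ← hl]
    simp [pvQ, List.getElem?_eq_getElem hkn, List.getElem?_eq_getElem hjn, ← hn,
      List.getD_eq_getElem?_getD]
  refine (PySem.List.foldl_congr_mem _ _ _ _ hcong).trans ?_
  rw [PySem.List.foldl_if_add_one]
  simp

-- B's recursion counts the mismatches of the index range [lo, lo+m), given enough fuel
theorem pvGoB_count (s : String) :
    ∀ (fuel m lo : Nat), m ≤ fuel → lo + m ≤ s.toList.length / 2 →
      pvGoB s (s.toList.length : Int) fuel (lo : Int) ((lo + m : Nat) : Int)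
        = ((List.range' lo m).countP (pvQ s.toList) : Int) := by
  intro fuel
  induction fuel with
  | zero => intro m lo hf _; interval_cases m; simp [pvGoB]
  | succ fuel ih =>
    intro m lo hf hbound
    set l := s.toList with hl
    set n := l.length with hn
    show (if ((lo + m : Nat) : Int) - (lo : Int) ≤ 0 then _ else _) = _
    rcases Nat.lt_or_ge m 2 with hm2 | hm2
    · interval_cases m
      · simp
      · have h0 : ¬ (((lo + 1 : Nat) : Int) - (lo : Int) ≤ 0) := by push_cast; omega
        have h1 : ((lo + 1 : Nat) : Int) - (lo : Int) = 1 := by push_cast; omega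
        rw [if_neg h0, if_pos h1]
        have hlon : lo < n := by omega
        have hj : (n : Int) - 1 - (lo : Int) = ((n - 1 - lo : Nat) : Int) := by omega
        have hjn : n - 1 - lo < n := by omega
        simp only [PySem.Str.pyGet?_natCast, hj, ← hl]
        simp [pvQ, List.getElem?_eq_getElem hlon, List.getElem?_eq_getElem hjn, ← hn,
          List.getD_eq_getElem?_getD, List.range'_succ, List.countP_cons]
    · have h0 : ¬ (((lo + m : Nat) : Int) - (lo : Int) ≤ 0) := by push_cast; omega
      have h1 : ¬ (((lo + m : Nat) : Int) - (lo : Int) = 1) := by push_cast; omega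
      rw [if_neg h0, if_neg h1]
      have hmid : PySem.Int.floordiv ((lo : Int) + ((lo + m : Nat) : Int)) 2
          = ((lo + m / 2 : Nat) : Int) := by
        rw [PySem.Int.floordiv_eq_ediv_of_pos (by omega : (0:Int) < 2)]
        push_cast
        omega
      rw [hmid]
      have hrec1 := ih (m / 2) lo (by omega) (by omega)
      have hrec2 := ih (m - m / 2) (lo + m / 2) (by omega) (by omega)
      rw [show ((lo + m / 2) + (m - m / 2) : Nat) = lo + m by omega] at hrec2
      rw [hrec1, hrec2]
      have hsplit : List.range' lo m = List.range' lo (m / 2) ++ List.range' (lo + m / 2) (m - m / 2) := by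
        rw [List.range'_append_1]
        congr 1
        omega
      rw [hsplit, List.countP_append]
      push_cast
      ring

-- ===== VERDICT (by name: the statement is the Claim_ definition above) =====
theorem computeSweetness_spec : Claim_equal_computeSweetness := by
  intro s _
  unfold Spec_computeSweetness computeSweetness_alt
  simp only [PySem.Str.len_eq]
  rw [show PySem.Int.floordiv ((s.toList.length : Int)) 2 = ((s.toList.length / 2 : Nat) : Int) from
        (by exact_mod_cast PySem.Int.floordiv_natCast s.toList.length 2)]
  rw [show ((s.toList.length / 2 : Nat) : Int).toNat = s.toList.length / 2 by omega]
  have := pvGoB_count s (s.toList.length / 2) (s.toList.length / 2) 0 (le_refl _) (by omega)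
  simp only [Nat.zero_add, Nat.cast_zero] at this
  rw [pvA_eq_countP, this, List.range_eq_range']
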